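-- pv_equiv track=rewrite | github.com/aberlins/DndCharacterApp | dndCharacterApp/utils/math_utils.py | get_speed
-- ===== SOURCE A (Python) =====
-- def get_speed(speed: int, bonuses: []) -> int:
--
--     # If bonuses is not None and contains ints then add them to the current score
--     if bonuses is not None:
--         for bonus in bonuses:
--             if isinstance(bonus, int):
--                 speed += bonus
--             else:
--                 return -1
--     return speed
-- ===== SOURCE B (Python) =====
-- def get_speed(speed: int, bonuses: []) -> int:
--     # Validate first, then sum back-to-front with an explicit index loop.
--     if bonuses is None:
--         return speed
--     items = list(bonuses)
--     if not all(isinstance(b, int) for b in items):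
--         return -1
--     total = 0
--     i = len(items) - 1
--     while i >= 0:
--         total = items[i] + total
--         i -= 1
--     return speed + total
-- ===== Notes on version B (the rewrite author's own statement) =====
-- stated objective: alternative
-- what changed: Replaces A's single interleaved add-or-bail forward loop with a separate validation pass followed by a back-to-front indexed summation loop.
import Mathlib
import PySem

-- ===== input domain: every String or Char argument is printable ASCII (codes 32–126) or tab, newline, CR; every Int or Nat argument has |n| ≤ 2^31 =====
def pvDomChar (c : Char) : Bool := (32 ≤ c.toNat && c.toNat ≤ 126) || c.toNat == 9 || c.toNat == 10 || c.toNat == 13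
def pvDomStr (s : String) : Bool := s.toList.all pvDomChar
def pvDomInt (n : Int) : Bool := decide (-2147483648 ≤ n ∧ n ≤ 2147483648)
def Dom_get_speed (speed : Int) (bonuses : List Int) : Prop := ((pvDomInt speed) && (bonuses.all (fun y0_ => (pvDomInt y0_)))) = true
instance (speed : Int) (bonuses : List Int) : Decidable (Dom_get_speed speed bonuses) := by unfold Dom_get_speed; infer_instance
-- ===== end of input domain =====

-- B validates first, then sums back-to-front with an indexed countdown loop (alternative decomposition).


-- ===== PORT A =====
-- A: interleaved forward loop; under the type convention bonuses is List Int
-- (never None, every element an int), so the isinstance branch always adds.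
def get_speed (speed : Int) (bonuses : List Int) : Int :=
  bonuses.foldl (fun s b => s + b) speed

-- ===== PORT B =====
-- B's while loop: `n` is the number of elements still to add (i = n - 1);
-- each step prepends items[n-1] to the running total.
def pvSumDown (items : List Int) : Nat → Int → Int
  | 0, total => total
  | n + 1, total => pvSumDown items n (items.getD n 0 + total)

-- B: the all-isinstance validation pass is vacuously true on List Int,
-- leaving the back-to-front summation.
def get_speed_alt (speed : Int) (bonuses : List Int) : Int :=
  speed + pvSumDown bonuses bonuses.length 0

-- ===== PRECONDITION & SPEC =====
def Spec_get_speed (speed : Int) (bonuses : List Int) (out : Int) : Prop := out = get_speed_alt speed bonuses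
instance (speed : Int) (bonuses : List Int) (out : Int) : Decidable (Spec_get_speed speed bonuses out) := by unfold Spec_get_speed; infer_instance

-- ===== CLAIM (what is proved, stated in full; the proofs are below) =====
def Claim_equal_get_speed : Prop := ∀ (speed : Int) (bonuses : List Int), Dom_get_speed speed bonuses → Spec_get_speed speed bonuses (get_speed speed bonuses)

-- ===== LEMMAS AND PROOFS =====

lemma pvSumDown_eq_take_sum (items : List Int) (n : Nat) (total : Int) :
    pvSumDown items n total = (items.take n).sum + total := by
  induction n generalizing total with
  | zero => simp [pvSumDown]
  | succ n ih =>
    rw [pvSumDown, ih]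
    by_cases h : n < items.length
    · have hts : items.take (n + 1) = items.take n ++ [items[n]] := by
        rw [List.take_add_one]
        simp [List.getElem?_eq_getElem h]
      rw [hts, List.sum_append]
      simp [List.getD, List.getElem?_eq_getElem h]
      ring
    · have h' : items.length ≤ n := Nat.le_of_not_lt h
      simp [List.getD, List.getElem?_eq_none_iff.mpr h', List.take_of_length_le h',
        List.take_of_length_le (Nat.le_succ_of_le h')]

lemma foldl_add_eq_sum (speed : Int) (bonuses : List Int) :
    bonuses.foldl (fun s b => s + b) speed = speed + bonuses.sum := by
  induction bonuses generalizing speed with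
  | nil => simp
  | cons x xs ih => simp [List.foldl, ih, List.sum_cons]; ring

-- ===== VERDICT (by name: the statement is the Claim_ definition above) =====
theorem get_speed_spec : Claim_equal_get_speed := by
  intro speed bonuses _
  unfold Spec_get_speed get_speed get_speed_alt
  rw [foldl_add_eq_sum, pvSumDown_eq_take_sum, List.take_of_length_le (le_refl _)]
  ring
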